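-- pv_equiv track=rewrite | github.com/Limha0/used_car_airflow | dags/list/sdag_reborncar_crawler.py | _get_model_key_for_lp_car_name
-- ===== SOURCE A (Python) =====
-- def _get_model_key_for_lp_car_name(lp_car_name, model_keys):
--     """lp_car_name으로 model_keys 중 매칭되는 키 반환. 없으면 None.
--     - 전체/마지막 단어 매칭
--     - 추가: car_name에 model_key가 포함된 경우 (가장 긴 매칭 우선)
--     """
--     name = (lp_car_name or "").strip()
--     if not name or not model_keys:
--         return None
--     if name in model_keys:
--         return name
--     parts = name.rsplit(maxsplit=1)
--     if len(parts) >= 2: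
--         last_part = parts[-1].strip()
--         if last_part in model_keys:
--             return last_part
--     # 포함 매칭: car_name에 model_key가 단어 단위로 포함된 경우
--     name_words = set(name.split())
--     for mk in sorted(model_keys, key=len, reverse=True):
--         if not mk:
--             continue
--         if mk in name_words or (mk in name and name.strip().startswith(mk)):
--             return mk
--     return None
-- ===== SOURCE B (Python) =====
-- def _get_model_key_for_lp_car_name(lp_car_name, model_keys):
--     """Single-pass longest-match: no sort; scan model_keys once keeping the
--     longest candidate (first in original order on ties)."""
--     name = (lp_car_name or "").strip()
--     if not name or not model_keys:
--         return None
--     keyset = set(model_keys)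
--     if name in keyset:
--         return name
--     parts = name.rsplit(maxsplit=1)
--     if len(parts) == 2 and parts[1] in keyset:
--         return parts[1]
--     words = set(name.split())
--     best = None
--     for mk in model_keys:
--         if mk and (mk in words or name.startswith(mk)) and (best is None or len(mk) > len(best)):
--             best = mk
--     return best
-- ===== Notes on version B (the rewrite author's own statement) =====
-- stated objective: faster
-- what changed: B drops the length-descending sort of model_keys and instead scans the keys once with an accumulator keeping the longest matching key (first in original order on ties), with set lookups for the exact/last-word checks.
import Mathlib
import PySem

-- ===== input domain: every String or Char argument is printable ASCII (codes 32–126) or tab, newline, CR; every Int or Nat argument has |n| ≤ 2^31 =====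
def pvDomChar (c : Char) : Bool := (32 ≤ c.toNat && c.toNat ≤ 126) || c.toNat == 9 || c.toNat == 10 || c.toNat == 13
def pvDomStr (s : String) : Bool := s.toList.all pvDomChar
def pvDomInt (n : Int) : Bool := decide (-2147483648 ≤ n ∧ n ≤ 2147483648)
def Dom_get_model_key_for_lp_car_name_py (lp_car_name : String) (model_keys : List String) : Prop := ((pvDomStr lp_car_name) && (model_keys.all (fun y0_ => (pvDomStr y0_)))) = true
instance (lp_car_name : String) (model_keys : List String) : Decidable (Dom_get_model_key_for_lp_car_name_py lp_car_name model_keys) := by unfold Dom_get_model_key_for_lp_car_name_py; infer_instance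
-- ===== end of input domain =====

-- B replaces A's sort of the keys by length with a single accumulator pass over the keys
-- (longest candidate wins, first in original order on ties); return values are identical.

-- ===== PORT A =====
-- hand port of s.rsplit(maxsplit=1) (whitespace separators, at most one split from the
-- right); exact: rstrip, peel the last whitespace-free run, drop the separating
-- whitespace run, keep everything to its left as the first piece.  Used by both ports
-- (both Pythons call name.rsplit(maxsplit=1)).
def pvRsplit1 (s : String) : List String :=
  let t := PySem.Chars.rstrip s.toList
  if t = [] then []
  else
    let rev := t.reverse
    let w := rev.takeWhile (fun c => !PySem.Chars.isspace c)
    let r := rev.dropWhile (fun c => !PySem.Chars.isspace c)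
    let r' := (r.dropWhile (fun c => PySem.Chars.isspace c)).reverse
    if r' = [] then [String.ofList w.reverse]
    else [String.ofList r', String.ofList w.reverse]

-- A's 'for mk in sorted(model_keys, key=len, reverse=True)' loop, branches in order
def pvLoopA (name : String) (name_words : PySem.Set String) : List String → Option String
  | [] => none
  | mk :: rest =>
    if mk = "" then pvLoopA name name_words rest
    else if PySem.Set.contains name_words mk
            || (PySem.Str.isIn mk name && PySem.Str.startswith (PySem.Str.strip name) mk) then some mk
    else pvLoopA name name_words rest

def get_model_key_for_lp_car_name_py (lp_car_name : String) (model_keys : List String) : Option String :=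
  let name := PySem.Str.strip lp_car_name   -- (lp_car_name or "").strip(): 'or ""' is a no-op on str
  if name = "" ∨ model_keys = [] then none
  else if name ∈ model_keys then some name
  else
    let parts := pvRsplit1 name
    let step2 : Option String :=
      if 2 ≤ parts.length then
        let last_part := PySem.Str.strip (PySem.List.pyGetD parts (-1) "")  -- parts[-1], in range: len ≥ 2
        if last_part ∈ model_keys then some last_part else none
      else none
    match step2 with
    | some r => some r
    | none =>
      let name_words : PySem.Set String := PySem.Set.ofList (PySem.Str.split₀ name)
      pvLoopA name name_words (PySem.List.sorted model_keys (fun s => PySem.Str.len s) true)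

-- ===== PORT B =====
def get_model_key_for_lp_car_name_py_alt (lp_car_name : String) (model_keys : List String) : Option String :=
  let name := PySem.Str.strip lp_car_name
  if name = "" ∨ model_keys = [] then none
  else
    let keyset : PySem.Set String := PySem.Set.ofList model_keys
    if PySem.Set.contains keyset name then some name
    else
      let parts := pvRsplit1 name
      let step2 : Option String :=
        if parts.length = 2 then
          let lw := PySem.List.pyGetD parts 1 ""    -- parts[1], in range: len = 2
          if PySem.Set.contains keyset lw then some lw else none
        else none
      match step2 with
      | some r => some r
      | none =>
        let words : PySem.Set String := PySem.Set.ofList (PySem.Str.split₀ name)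
        model_keys.foldl (fun best mk =>
          if decide (mk ≠ "") && (PySem.Set.contains words mk || PySem.Str.startswith name mk)
             && (match best with | none => true | some b => decide (PySem.Str.len b < PySem.Str.len mk))
          then some mk else best) none

-- ===== PRECONDITION & SPEC =====
def Spec_get_model_key_for_lp_car_name_py (lp_car_name : String) (model_keys : List String) (out : Option String) : Prop := out = get_model_key_for_lp_car_name_py_alt lp_car_name model_keys
instance (lp_car_name : String) (model_keys : List String) (out : Option String) : Decidable (Spec_get_model_key_for_lp_car_name_py lp_car_name model_keys out) := by unfold Spec_get_model_key_for_lp_car_name_py; infer_instance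

-- ===== CLAIM (what is proved, stated in full; the proofs are below) =====
def Claim_equal_get_model_key_for_lp_car_name_py : Prop := ∀ (lp_car_name : String) (model_keys : List String), Dom_get_model_key_for_lp_car_name_py lp_car_name model_keys → Spec_get_model_key_for_lp_car_name_py lp_car_name model_keys (get_model_key_for_lp_car_name_py lp_car_name model_keys)

-- ===== LEMMAS AND PROOFS =====

-- dropWhile is idempotent
lemma pv_dropWhile_dropWhile {α : Type} (p : α → Bool) (l : List α) :
    (l.dropWhile p).dropWhile p = l.dropWhile p := by
  cases h : l.dropWhile p with
  | nil => simp
  | cons a t =>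
    have ha : p a = false := by
      have := List.head_dropWhile_not p (l := l) (by rw [h]; simp)
      simpa [h] using this
    simp [List.dropWhile_cons, ha]

lemma pv_dropWhile_eq_self {α : Type} (p : α → Bool) (l : List α)
    (h : ∀ c ∈ l, p c = false) : l.dropWhile p = l := by
  cases l with
  | nil => rfl
  | cons a t => simp [List.dropWhile_cons, h a (by simp)]

-- strip is idempotent (List Char level)
lemma pv_strip_idem (s : List Char) :
    PySem.Chars.strip (PySem.Chars.strip s) = PySem.Chars.strip s := by
  unfold PySem.Chars.strip PySem.Chars.lstrip PySem.Chars.rstrip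
  set y := s.dropWhile PySem.Chars.isspace with hy
  set z := (y.reverse.dropWhile PySem.Chars.isspace).reverse with hz
  have hzy : z <+: y := by
    have hsuf : y.reverse.dropWhile PySem.Chars.isspace <:+ y.reverse :=
      List.dropWhile_suffix _
    have := List.reverse_prefix (l₁ := y.reverse.dropWhile PySem.Chars.isspace) (l₂ := y.reverse)
    rw [hz]
    simpa using this.mpr hsuf
  have hzdrop : z.dropWhile PySem.Chars.isspace = z := by
    cases hcz : z with
    | nil => rfl
    | cons a t =>
      have hay : ∃ u, y = a :: u := by
        obtain ⟨w, hw⟩ := hzy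
        rw [hcz] at hw
        exact ⟨t ++ w, hw.symm⟩
      obtain ⟨u, hu⟩ := hay
      have ha : PySem.Chars.isspace a = false := by
        have := List.head_dropWhile_not PySem.Chars.isspace (l := s) (by rw [← hy, hu]; simp)
        simpa [← hy, hu] using this
      simp [List.dropWhile_cons, ha]
  rw [hzdrop, hz]
  rw [List.reverse_reverse, pv_dropWhile_dropWhile]

lemma pv_str_strip_idem (s : String) :
    PySem.Str.strip (PySem.Str.strip s) = PySem.Str.strip s := by
  unfold PySem.Str.strip
  rw [String.toList_ofList, pv_strip_idem]

lemma pv_strip_no_space (l : List Char) (h : ∀ c ∈ l, PySem.Chars.isspace c = false) :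
    PySem.Chars.strip l = l := by
  unfold PySem.Chars.strip PySem.Chars.lstrip PySem.Chars.rstrip
  rw [pv_dropWhile_eq_self _ _ h,
      pv_dropWhile_eq_self _ _ (by simpa using h), List.reverse_reverse]


lemma pv_loopA_eq_find (name : String) (words : PySem.Set String) (l : List String) :
    pvLoopA name words l
    = l.find? (fun mk => decide (mk ≠ "")
        && (PySem.Set.contains words mk
            || (PySem.Str.isIn mk name && PySem.Str.startswith (PySem.Str.strip name) mk))) := by
  induction l with
  | nil => rfl
  | cons mk rest ih =>
    rw [pvLoopA, List.find?_cons]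
    try simp only []
    by_cases hmk : mk = ""
    · subst hmk
      simp only [if_pos rfl, ih]
      rfl
    · have hd : decide (mk ≠ "") = true := by simp [hmk]
      rw [if_neg hmk, hd, Bool.true_and]
      cases hc : (PySem.Set.contains words mk
          || (PySem.Str.isIn mk name && PySem.Str.startswith (PySem.Str.strip name) mk)) with
      | true => rfl
      | false => exact ih

lemma pv_find_insert (p : String → Bool) (x : String) (acc : List String)
    (h : acc.Pairwise (fun a b => PySem.Str.len b ≤ PySem.Str.len a)) :
    List.find? p (PySem.List.insertBy
        (fun a b => decide (PySem.Str.len b < PySem.Str.len a)) x acc)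
    = match List.find? p acc with
      | none => if p x then some x else none
      | some m => if p x && decide (PySem.Str.len m < PySem.Str.len x) then some x else some m := by
  induction acc with
  | nil =>
    rw [PySem.List.insertBy.eq_def]
    cases hp : p x <;> simp [List.find?_cons, hp]
  | cons y ys ih =>
    rcases List.pairwise_cons.mp h with ⟨hy, hys⟩
    have hins : PySem.List.insertBy
        (fun a b => decide (PySem.Str.len b < PySem.Str.len a)) x (y :: ys)
        = if decide (PySem.Str.len y < PySem.Str.len x) then x :: y :: ys
          else y :: PySem.List.insertBy
            (fun a b => decide (PySem.Str.len b < PySem.Str.len a)) x ys := by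
      rw [PySem.List.insertBy.eq_def]
    rw [hins]
    by_cases hcmp : PySem.Str.len y < PySem.Str.len x
    · have hcmpN : y.length < x.length := by
        simp only [PySem.Str.len, String.length_toList] at hcmp
        exact_mod_cast hcmp
      rw [if_pos (by simp [hcmpN])]
      cases hf : List.find? p (y :: ys) with
      | none => cases hp : p x <;> simp [List.find?_cons, hp, hf]
      | some m =>
        have hm : m ∈ y :: ys := List.mem_of_find?_eq_some hf
        have hlt : PySem.Str.len m < PySem.Str.len x := by
          rcases List.mem_cons.mp hm with rfl | hmem
          · exact hcmp
          · exact lt_of_le_of_lt (hy m hmem) hcmp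
        have hltN : m.length < x.length := by
          simp only [PySem.Str.len, String.length_toList] at hlt
          exact_mod_cast hlt
        cases hp : p x <;> simp [List.find?_cons, hp, hf, hltN] <;> first | rfl | (intro hcon; omega) | omega
    · have hcmpN : x.length ≤ y.length := by
        simp only [PySem.Str.len, String.length_toList, not_lt] at hcmp
        exact_mod_cast hcmp
      rw [if_neg (by simp; omega)]
      rw [List.find?_cons]
      cases hp : p y with
      | true =>
        simp [hp, List.find?_cons] <;> first | rfl | (intro hcon1 hcon2; omega) | omega
      | false => rw [ih hys]; simp [List.find?_cons, hp]

lemma pv_sorted_find_eq_fold (p : String → Bool) (xs : List String) :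
    List.find? p (PySem.List.sorted xs (fun s => PySem.Str.len s) true)
    = xs.foldl (fun best mk =>
        if p mk && (match best with | none => true | some b => decide (PySem.Str.len b < PySem.Str.len mk))
        then some mk else best) none := by
  induction xs using List.reverseRecOn with
  | nil => rw [PySem.List.sorted_rev_eq_foldl_insertBy]; rfl
  | append_singleton xs x ih =>
    have hsort : PySem.List.sorted (xs ++ [x]) (fun s => PySem.Str.len s) true
        = PySem.List.insertBy (fun a b => decide (PySem.Str.len b < PySem.Str.len a)) x
            (PySem.List.sorted xs (fun s => PySem.Str.len s) true) := by
      rw [PySem.List.sorted_rev_eq_foldl_insertBy, List.foldl_append,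
          ← PySem.List.sorted_rev_eq_foldl_insertBy]
      rfl
    rw [hsort, List.foldl_append,
        pv_find_insert p x _ (PySem.List.sorted_pairwise_rev xs (fun s => PySem.Str.len s)),
        ih]
    cases hb : xs.foldl (fun best mk =>
        if p mk && (match best with | none => true | some b => decide (PySem.Str.len b < PySem.Str.len mk))
        then some mk else best) none with
    | none => cases hp : p x <;> simp [hp]
    | some m => cases hp : p x <;> simp [hp]

lemma pv_cond_eq (name : String) (hname : PySem.Str.strip name = name)
    (words : PySem.Set String) (mk : String) :
    (decide (mk ≠ "")
      && (PySem.Set.contains words mk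
          || (PySem.Str.isIn mk name && PySem.Str.startswith (PySem.Str.strip name) mk)))
    = (decide (mk ≠ "")
      && (PySem.Set.contains words mk || PySem.Str.startswith name mk)) := by
  rw [hname]
  cases hsw : PySem.Str.startswith name mk with
  | false => rw [Bool.and_false, Bool.or_false]
  | true =>
    have hin : PySem.Str.isIn mk name = true := by
      rw [PySem.Str.isIn_eq, PySem.Chars.isIn_iff_infix]
      have hp : mk.toList <+: name.toList := by
        rw [PySem.Str.startswith_eq] at hsw
        exact (PySem.Chars.startswith_iff _ _).mp hsw
      exact hp.isInfix
    rw [hin, Bool.true_and]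

lemma pv_step2_eq (name : String) (model_keys : List String) :
    (if 2 ≤ (pvRsplit1 name).length then
        (let last_part := PySem.Str.strip (PySem.List.pyGetD (pvRsplit1 name) (-1) "")
         if last_part ∈ model_keys then some last_part else none)
      else none)
    = (if (pvRsplit1 name).length = 2 then
        (let lw := PySem.List.pyGetD (pvRsplit1 name) 1 ""
         if PySem.Set.contains (PySem.Set.ofList model_keys) lw then some lw else none)
      else none) := by
  have hws : ∀ c ∈ ((PySem.Chars.rstrip name.toList).reverse.takeWhile
        (fun c => !PySem.Chars.isspace c)).reverse, PySem.Chars.isspace c = false := by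
    intro c hc
    rw [List.mem_reverse] at hc
    have := List.mem_takeWhile_imp hc
    simpa using this
  unfold pvRsplit1
  by_cases h1 : PySem.Chars.rstrip name.toList = []
  · simp [h1]
  · simp only [if_neg h1]
    by_cases h2 : (((PySem.Chars.rstrip name.toList).reverse.dropWhile
        (fun c => !PySem.Chars.isspace c)).dropWhile (fun c => PySem.Chars.isspace c)).reverse = []
    · simp [h2]
    · simp only [if_neg h2]
      have hget1 : PySem.List.pyGetD
          [String.ofList (((PySem.Chars.rstrip name.toList).reverse.dropWhile
              (fun c => !PySem.Chars.isspace c)).dropWhile (fun c => PySem.Chars.isspace c)).reverse,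
           String.ofList ((PySem.Chars.rstrip name.toList).reverse.takeWhile
              (fun c => !PySem.Chars.isspace c)).reverse] (-1) ""
          = String.ofList ((PySem.Chars.rstrip name.toList).reverse.takeWhile
              (fun c => !PySem.Chars.isspace c)).reverse := by
        simp [PySem.List.pyGetD, PySem.List.pyGet?, PySem.List.pyIdx?]
      have hget2 : PySem.List.pyGetD
          [String.ofList (((PySem.Chars.rstrip name.toList).reverse.dropWhile
              (fun c => !PySem.Chars.isspace c)).dropWhile (fun c => PySem.Chars.isspace c)).reverse,
           String.ofList ((PySem.Chars.rstrip name.toList).reverse.takeWhile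
              (fun c => !PySem.Chars.isspace c)).reverse] 1 ""
          = String.ofList ((PySem.Chars.rstrip name.toList).reverse.takeWhile
              (fun c => !PySem.Chars.isspace c)).reverse := by
        simp [PySem.List.pyGetD, PySem.List.pyGet?, PySem.List.pyIdx?]
      have hstrip : PySem.Str.strip (String.ofList ((PySem.Chars.rstrip name.toList).reverse.takeWhile
            (fun c => !PySem.Chars.isspace c)).reverse)
          = String.ofList ((PySem.Chars.rstrip name.toList).reverse.takeWhile
            (fun c => !PySem.Chars.isspace c)).reverse := by
        unfold PySem.Str.strip
        rw [String.toList_ofList, pv_strip_no_space _ hws]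
      simp only [List.length_cons, List.length_nil, hget1, hget2, hstrip]
      by_cases hmem : String.ofList ((PySem.Chars.rstrip name.toList).reverse.takeWhile
          (fun c => !PySem.Chars.isspace c)).reverse ∈ model_keys
      · simp [hmem, PySem.Set.contains_iff, PySem.Set.mem_ofList]
      · simp [hmem, PySem.Set.contains_iff, PySem.Set.mem_ofList]


-- ===== VERDICT (by name: the statement is the Claim_ definition above) =====
set_option maxHeartbeats 1000000 in
theorem get_model_key_for_lp_car_name_py_spec : Claim_equal_get_model_key_for_lp_car_name_py := by
  intro lp_car_name model_keys _hdom
  unfold Spec_get_model_key_for_lp_car_name_py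
  unfold get_model_key_for_lp_car_name_py get_model_key_for_lp_car_name_py_alt
  dsimp only []
  have hidem : PySem.Str.strip (PySem.Str.strip lp_car_name) = PySem.Str.strip lp_car_name :=
    pv_str_strip_idem lp_car_name
  by_cases h1 : PySem.Str.strip lp_car_name = "" ∨ model_keys = []
  · rw [if_pos h1, if_pos h1]
  · rw [if_neg h1, if_neg h1]
    have hcmem : (PySem.Set.contains (PySem.Set.ofList model_keys)
        (PySem.Str.strip lp_car_name) = true) ↔ PySem.Str.strip lp_car_name ∈ model_keys := by
      rw [PySem.Set.contains_iff, PySem.Set.mem_ofList]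
    by_cases h2 : PySem.Str.strip lp_car_name ∈ model_keys
    · rw [if_pos h2, if_pos (hcmem.mpr h2)]
    · rw [if_neg h2, if_neg (fun hc => h2 (hcmem.mp hc))]
      rw [pv_step2_eq]
      set s := (if (pvRsplit1 (PySem.Str.strip lp_car_name)).length = 2 then
          (let lw := PySem.List.pyGetD (pvRsplit1 (PySem.Str.strip lp_car_name)) 1 ""
           if PySem.Set.contains (PySem.Set.ofList model_keys) lw then some lw else none)
        else none) with hs
      clear_value s
      cases s with
      | some r => rfl
      | none =>
        rw [pv_loopA_eq_find,
            show (fun mk => decide (mk ≠ "")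
              && (PySem.Set.contains (PySem.Set.ofList (PySem.Str.split₀ (PySem.Str.strip lp_car_name))) mk
                  || (PySem.Str.isIn mk (PySem.Str.strip lp_car_name)
                      && PySem.Str.startswith (PySem.Str.strip (PySem.Str.strip lp_car_name)) mk)))
              = (fun mk => decide (mk ≠ "")
              && (PySem.Set.contains (PySem.Set.ofList (PySem.Str.split₀ (PySem.Str.strip lp_car_name))) mk
                  || PySem.Str.startswith (PySem.Str.strip lp_car_name) mk))
            from funext (pv_cond_eq _ hidem _)]
        exact pv_sorted_find_eq_fold _ model_keys
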